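-- pv_equiv track=rewrite | github.com/itsrody/uBlockUnified | src/database.py | _pattern_to_regex
-- ===== SOURCE A (Python) =====
-- def _pattern_to_regex(pattern):
--     """Convert a pattern to a regular expression for matching."""
--     # Escape special regex characters except * which we'll convert to .*
--     special_chars = '.^$+?()[]{}|\\/'
--     regex = ''
--     for char in pattern:
--         if char == '*':
--             regex += '.*'
--         elif char in special_chars:
--             regex += '\\' + char
--         else:
--             regex += char
--     return '^' + regex + '$'
-- ===== SOURCE B (Python) =====
-- def _pattern_to_regex(pattern):
--     """Convert a pattern to a regular expression for matching."""
--     special = set('.^$+?()[]{}|\\/')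
--
--     def esc(seg):
--         return ''.join('\\' + ch if ch in special else ch for ch in seg)
--
--     return '^' + '.*'.join(esc(seg) for seg in pattern.split('*')) + '$'
-- ===== Notes on version B (the rewrite author's own statement) =====
-- stated objective: simpler
-- what changed: Replaces A's char-by-char accumulator loop with a different decomposition: split the pattern at wildcards, escape each segment via a precomputed set of special characters, and join the escaped segments with the regex any-sequence separator.
import Mathlib
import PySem

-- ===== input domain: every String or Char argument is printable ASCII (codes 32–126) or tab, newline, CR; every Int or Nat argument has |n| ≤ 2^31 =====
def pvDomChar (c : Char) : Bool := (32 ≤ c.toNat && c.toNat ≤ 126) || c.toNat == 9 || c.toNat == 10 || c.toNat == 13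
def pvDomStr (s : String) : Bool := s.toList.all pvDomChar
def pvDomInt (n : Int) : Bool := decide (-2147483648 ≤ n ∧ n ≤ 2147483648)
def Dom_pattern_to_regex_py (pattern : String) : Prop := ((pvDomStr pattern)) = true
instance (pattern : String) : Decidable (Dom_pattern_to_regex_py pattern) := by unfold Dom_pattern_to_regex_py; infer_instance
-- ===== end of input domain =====

-- B replaces A's char-by-char accumulator loop with a split-at-wildcards / escape-each-segment / join decomposition (objective: simpler).

-- ===== PORT A =====
-- special_chars = '.^$+?()[]{}|\/'
def pvSpecialsA : List Char := ".^$+?()[]{}|\\/".toList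

def pattern_to_regex_py (pattern : String) : String :=
  -- regex = ''; for char in pattern: …  (string concatenation done on List Char)
  let regex : List Char := pattern.toList.foldl (fun acc char =>
    if char = '*' then acc ++ ['.', '*']
    else if PySem.Chars.isIn [char] pvSpecialsA then acc ++ ['\\', char]
    else acc ++ [char]) []
  String.ofList ('^' :: regex ++ ['$'])

-- ===== PORT B =====
-- special = set('.^$+?()[]{}|\/')
def pvSpecialSet : PySem.Set Char := PySem.Set.ofList ".^$+?()[]{}|\\/".toList

-- esc(seg) = ''.join('\\' + ch if ch in special else ch for ch in seg)
def pvEscape (seg : List Char) : List Char :=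
  seg.flatMap (fun ch => if PySem.Set.contains pvSpecialSet ch then ['\\', ch] else [ch])

def pattern_to_regex_py_alt (pattern : String) : String :=
  -- pattern.split('*') with a one-char separator = List.splitOn '*' (exact for a non-empty single-char sep);
  -- '.*'.join(…) = PySem.Chars.join ['.','*'] …
  String.ofList ('^' :: PySem.Chars.join ['.', '*'] ((pattern.toList.splitOn '*').map pvEscape) ++ ['$'])

-- ===== PRECONDITION & SPEC =====
def Spec_pattern_to_regex_py (pattern : String) (out : String) : Prop := out = pattern_to_regex_py_alt pattern
instance (pattern : String) (out : String) : Decidable (Spec_pattern_to_regex_py pattern out) := by unfold Spec_pattern_to_regex_py; infer_instance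

-- ===== CLAIM (what is proved, stated in full; the proofs are below) =====
def Claim_equal_pattern_to_regex_py : Prop := ∀ (pattern : String), Dom_pattern_to_regex_py pattern → Spec_pattern_to_regex_py pattern (pattern_to_regex_py pattern)

-- ===== LEMMAS AND PROOFS =====

-- A's per-character contribution
def pvStepA (char : Char) : List Char :=
  if char = '*' then ['.', '*']
  else if PySem.Chars.isIn [char] pvSpecialsA then ['\\', char]
  else [char]

lemma stepA_eq_escape {c : Char} (h : c ≠ '*') :
    pvStepA c = pvEscape [c] := by
  have hmem : PySem.Chars.isIn [c] pvSpecialsA = PySem.Set.contains pvSpecialSet c := by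
    by_cases hc : c ∈ pvSpecialsA
    · have h1 : PySem.Chars.isIn [c] pvSpecialsA = true :=
        (PySem.Chars.isIn_iff_infix _ _).mpr ((List.singleton_infix_iff _ _).mpr hc)
      have h2 : PySem.Set.contains pvSpecialSet c = true :=
        (PySem.Set.contains_iff pvSpecialSet c).mpr
          (show c ∈ pvSpecialSet from (PySem.Set.mem_ofList _ c).mpr hc)
      rw [h1, h2]
    · have h1 : PySem.Chars.isIn [c] pvSpecialsA = false := by
        rw [PySem.Chars.isIn_eq_false_iff]
        exact fun hh => hc ((List.singleton_infix_iff _ _).mp hh)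
      have h2 : PySem.Set.contains pvSpecialSet c = false := by
        cases hcc : PySem.Set.contains pvSpecialSet c
        · rfl
        · exact absurd (show c ∈ pvSpecialsA from
            (PySem.Set.mem_ofList _ c).mp ((PySem.Set.contains_iff pvSpecialSet c).mp hcc)) hc
      rw [h1, h2]
  simp [pvStepA, pvEscape, h, hmem]

lemma splitOnP_exists_cons (p : Char → Bool) (cs : List Char) :
    ∃ r rs, cs.splitOnP p = r :: rs := by
  induction cs with
  | nil => exact ⟨[], [], by simp⟩
  | cons c cs ih =>
    obtain ⟨r, rs, hr⟩ := ih
    rw [List.splitOnP_cons]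
    by_cases h : p c = true
    · exact ⟨[], cs.splitOnP p, by simp [h]⟩
    · exact ⟨c :: r, rs, by simp [h, hr]⟩

lemma intercalate_cons (sep a : List Char) (l : List (List Char)) :
    List.intercalate sep (a :: l) =
      a ++ (if l = [] then [] else sep ++ List.intercalate sep l) := by
  cases l with
  | nil => simp [List.intercalate]
  | cons b l => simp [List.intercalate, List.intersperse]

lemma flatMap_stepA_eq (cs : List Char) :
    cs.flatMap pvStepA =
      List.intercalate ['.', '*'] ((cs.splitOnP (· == '*')).map pvEscape) := by
  induction cs with
  | nil => simp [List.intercalate, pvEscape]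
  | cons c cs ih =>
    rw [List.splitOnP_cons]
    obtain ⟨r, rs, hr⟩ := splitOnP_exists_cons (· == '*') cs
    by_cases h : c = '*'
    · have : cs.splitOnP (· == '*') ≠ [] := by rw [hr]; simp
      simp only [h, beq_self_eq_true, if_pos, List.flatMap_cons, List.map_cons,
        intercalate_cons, pvStepA]
      simp [ih, pvEscape, List.map_eq_nil_iff, this]
    · have hb : (c == '*') = false := by simp [h]
      rw [hb]
      simp only [if_neg Bool.false_ne_true, hr, List.modifyHead_cons, List.map_cons,
        List.flatMap_cons, intercalate_cons]
      rw [stepA_eq_escape h]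
      have : pvEscape (c :: r) = pvEscape [c] ++ pvEscape r := by
        simp [pvEscape]
      rw [this, List.append_assoc]
      congr 1
      rw [ih, hr, List.map_cons, intercalate_cons]

-- ===== VERDICT (by name: the statement is the Claim_ definition above) =====
theorem pattern_to_regex_py_spec : Claim_equal_pattern_to_regex_py := by
  intro pattern _
  unfold Spec_pattern_to_regex_py pattern_to_regex_py pattern_to_regex_py_alt
  have hfun : (fun (acc : List Char) (char : Char) =>
      if char = '*' then acc ++ ['.', '*']
      else if PySem.Chars.isIn [char] pvSpecialsA then acc ++ ['\\', char]
      else acc ++ [char]) = (fun acc char => acc ++ pvStepA char) := by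
    funext acc char
    simp only [pvStepA]
    split_ifs <;> rfl
  rw [hfun, PySem.List.foldl_append_eq_flatMap, flatMap_stepA_eq]
  rfl
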